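-- pv_equiv track=rewrite | github.com/caozhichongchong/crispr_finder | bin/spacer_parsimony.py | compute_allchanges
-- ===== SOURCE A (Python) =====
-- def compute_allchanges(besttree,anno,new_names):
--     total_changeset = [0, 0, 0]  # nochange, gain, loss
--     reference = [k for k in besttree if new_names.get(k,'None') == 'Srefer']
--     if reference == []:
--         reference = '0'
--     else:
--         reference = reference[0]
--     root_anno = besttree[reference]
--     for k in besttree:
--         if k in anno:
--             total_changeset[compute_gainloss(root_anno,besttree[k])] += 1
--     return total_changeset
--
-- def compute_gainloss(parentanno,childanno):
--     if parentanno == '1' and childanno == '0':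
--         return 2 #loss
--     elif parentanno == '0' and childanno == '1':
--         return 1 # gain
--     return 0
-- ===== SOURCE B (Python) =====
-- def compute_allchanges(besttree, anno, new_names):
--     reference = [k for k in besttree if new_names.get(k, 'None') == 'Srefer']
--     root_anno = besttree[reference[0] if reference else '0']
--     # inverted index: annotation value -> keys of besttree carrying it (one grouping pass)
--     buckets = {}
--     for k, v in besttree.items():
--         buckets.setdefault(v, []).append(k)
--     # keys shared with anno, as a set; the three counters are set-intersection cardinalities
--     common = besttree.keys() & anno.keys()
--     gain = len(common.intersection(buckets.get('1', []))) if root_anno == '0' else 0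
--     loss = len(common.intersection(buckets.get('0', []))) if root_anno == '1' else 0
--     return [len(common) - gain - loss, gain, loss]
-- ===== Notes on version B (the rewrite author's own statement) =====
-- stated objective: alternative
-- what changed: B replaces A's per-element classify-and-increment loop by an inverted index (annotation value -> keys) built in one grouping pass plus a key set intersected with anno's keys; the three counters become set-intersection cardinalities, and compute_gainloss disappears.
import Mathlib
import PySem

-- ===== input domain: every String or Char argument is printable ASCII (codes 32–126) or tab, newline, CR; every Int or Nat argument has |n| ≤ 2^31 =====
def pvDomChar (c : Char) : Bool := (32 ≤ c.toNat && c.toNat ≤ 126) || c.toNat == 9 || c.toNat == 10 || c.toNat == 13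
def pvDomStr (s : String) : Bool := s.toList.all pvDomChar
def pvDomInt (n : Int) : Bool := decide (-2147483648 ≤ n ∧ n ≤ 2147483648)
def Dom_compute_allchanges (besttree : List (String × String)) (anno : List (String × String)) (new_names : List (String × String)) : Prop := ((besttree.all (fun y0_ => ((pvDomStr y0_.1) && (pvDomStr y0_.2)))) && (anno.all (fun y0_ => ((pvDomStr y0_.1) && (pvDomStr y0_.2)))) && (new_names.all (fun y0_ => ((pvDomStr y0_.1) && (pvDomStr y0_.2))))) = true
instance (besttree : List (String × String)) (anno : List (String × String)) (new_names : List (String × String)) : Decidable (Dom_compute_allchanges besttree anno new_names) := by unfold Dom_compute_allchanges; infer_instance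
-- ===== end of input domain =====

-- B builds an inverted index (annotation value -> its keys) and the set of keys shared with anno,
-- and reads the three counters off as set-intersection cardinalities, dropping A's per-element
-- classify-and-increment loop and the compute_gainloss helper (objective: alternative).
-- Pre_ excludes exactly the inputs where A raises KeyError (no 'Srefer' reference and '0' not a key of besttree).
-- ===== PORT A =====
def compute_gainloss_port (parentanno childanno : String) : Nat :=
  if parentanno = "1" ∧ childanno = "0" then 2
  else if parentanno = "0" ∧ childanno = "1" then 1
  else 0

-- total_changeset[i] += 1
def pv_bump (t : List Int) (i : Nat) : List Int := t.set i (t.getD i 0 + 1)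

def compute_allchanges (besttree : List (String × String)) (anno : List (String × String)) (new_names : List (String × String)) : List Int :=
  let btd := PySem.Dict.ofList besttree
  let nnd := PySem.Dict.ofList new_names
  let ad := PySem.Dict.ofList anno
  let refs := btd.keys.filter (fun k => nnd.getD k "None" = "Srefer")
  let reference := match refs with | [] => "0" | r :: _ => r
  let root_anno := btd.getD reference ""   -- KeyError case excluded by Pre_
  btd.keys.foldl
    (fun t k => if ad.contains k then pv_bump t (compute_gainloss_port root_anno (btd.getD k "")) else t)
    [0, 0, 0]

-- ===== PORT B =====
def compute_allchanges_alt (besttree : List (String × String)) (anno : List (String × String)) (new_names : List (String × String)) : List Int :=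
  let btd := PySem.Dict.ofList besttree
  let nnd := PySem.Dict.ofList new_names
  let ad := PySem.Dict.ofList anno
  let reference := btd.keys.filter (fun k => nnd.getD k "None" = "Srefer")
  let root_anno := btd.getD (match reference with | [] => "0" | r :: _ => r) ""   -- KeyError case excluded by Pre_
  -- buckets: annotation value -> list of besttree keys carrying it (setdefault(v, []).append(k))
  let buckets := btd.items.foldl (fun d p => d.modify p.2 [] (fun l => l ++ [p.1])) PySem.Dict.empty
  -- common = besttree.keys() & anno.keys(); only cardinalities of it are used, so order is immaterial
  let common : PySem.Set String := PySem.Set.inter btd.keys ad.keys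
  let gain : Int := if root_anno = "0" then ((PySem.Set.inter common (buckets.getD "1" [])).length : Int) else 0
  let loss : Int := if root_anno = "1" then ((PySem.Set.inter common (buckets.getD "0" [])).length : Int) else 0
  [(common.length : Int) - gain - loss, gain, loss]

-- ===== PRECONDITION & SPEC =====
-- Pre_: a reference key exists ('Srefer' in new_names) or '0' is a key of besttree;
-- otherwise the Python A raises KeyError('0') at besttree[reference] (B raises the same).
def Pre_compute_allchanges (besttree : List (String × String)) (anno : List (String × String)) (new_names : List (String × String)) : Prop :=
  ((PySem.Dict.ofList besttree).keys.any
      (fun k => (PySem.Dict.ofList new_names).getD k "None" = "Srefer"))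
    ∨ (PySem.Dict.ofList besttree).contains "0" = true
instance (besttree : List (String × String)) (anno : List (String × String)) (new_names : List (String × String)) : Decidable (Pre_compute_allchanges besttree anno new_names) := by unfold Pre_compute_allchanges; infer_instance

def pvWitness_compute_allchanges : (List (String × String)) × (List (String × String)) × (List (String × String)) :=
  ([("0", "0"), ("a", "1")], [("a", "x")], [])

def Spec_compute_allchanges (besttree : List (String × String)) (anno : List (String × String)) (new_names : List (String × String)) (out : List Int) : Prop := out = compute_allchanges_alt besttree anno new_names
instance (besttree : List (String × String)) (anno : List (String × String)) (new_names : List (String × String)) (out : List Int) : Decidable (Spec_compute_allchanges besttree anno new_names out) := by unfold Spec_compute_allchanges; infer_instance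

-- ===== CLAIM (what is proved, stated in full; the proofs are below) =====
def Claim_equal_compute_allchanges : Prop := ∀ (besttree : List (String × String)) (anno : List (String × String)) (new_names : List (String × String)), Dom_compute_allchanges besttree anno new_names → Pre_compute_allchanges besttree anno new_names → Spec_compute_allchanges besttree anno new_names (compute_allchanges besttree anno new_names)

-- ===== LEMMAS AND PROOFS =====

-- The counting fold characterised: starting from [a, b, c], the fold adds the three countP's.
theorem foldl_bump_eq (g : String → Nat) (vals : List String) (a b c : Int) :
    vals.foldl (fun t v => pv_bump t (g v)) [a, b, c] =
      [a + ((vals.countP (fun v => g v = 0) : Nat) : Int),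
       b + ((vals.countP (fun v => g v = 1) : Nat) : Int),
       c + ((vals.countP (fun v => g v = 2) : Nat) : Int)] := by
  induction vals generalizing a b c with
  | nil => simp
  | cons v vs ih =>
    simp only [List.foldl_cons, List.countP_cons]
    have hg : g v = 0 ∨ g v = 1 ∨ g v = 2 ∨ ∃ m, g v = m + 3 := by
      rcases Nat.lt_or_ge (g v) 3 with h | h
      · omega
      · exact .inr (.inr (.inr ⟨g v - 3, by omega⟩))
    rcases hg with h | h | h | ⟨m, h⟩
    · have hb : pv_bump [a, b, c] (g v) = [a + 1, b, c] := by simp [pv_bump, h]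
      rw [hb, ih]; simp [h]; omega
    · have hb : pv_bump [a, b, c] (g v) = [a, b + 1, c] := by simp [pv_bump, h]
      rw [hb, ih]; simp [h]; omega
    · have hb : pv_bump [a, b, c] (g v) = [a, b, c + 1] := by simp [pv_bump, h]
      rw [hb, ih]; simp [h]; omega
    · have hb : pv_bump [a, b, c] (g v) = [a, b, c] := by simp [pv_bump, h, List.set]
      rw [hb, ih]; simp [h]

-- B's grouping fold read back: bucket v holds exactly the besttree keys annotated v, in order.
theorem buckets_getD (items : List (String × String)) (v : String) :
    ((items.foldl (fun d p => d.modify p.2 [] (fun l => l ++ [p.1])) PySem.Dict.empty).getD v []) =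
      (items.filter (fun p => p.2 == v)).map (fun p => p.1) := by
  have h := PySem.Dict.getD_foldl_modify_append (items.map (fun p => (p.2, p.1)))
      (PySem.Dict.empty : PySem.Dict String (List String)) v
  rw [List.foldl_map] at h
  simpa [List.filter_map, Function.comp] using h

theorem compute_allchanges_spec : Claim_equal_compute_allchanges := by
  intro besttree anno new_names _hdom _hpre
  unfold Spec_compute_allchanges compute_allchanges compute_allchanges_alt
  simp only []
  set btd := PySem.Dict.ofList besttree with hbtd
  set nnd := PySem.Dict.ofList new_names with hnnd
  set ad := PySem.Dict.ofList anno with had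
  have hnd : btd.keys.Nodup := PySem.Dict.nodup_keys_ofList besttree
  set root := btd.getD (match btd.keys.filter (fun k => nnd.getD k "None" = "Srefer") with
      | [] => "0" | r :: _ => r) "" with hroot
  clear_value root
  -- B's common set is A's filtered key list
  have hcommon : PySem.Set.inter btd.keys ad.keys = btd.keys.filter (fun k => ad.contains k) := by
    unfold PySem.Set.inter
    refine List.filter_congr ?_
    intro k _
    simp [PySem.Set.contains, PySem.Dict.contains_eq_decide_mem_keys]
  rw [hcommon, buckets_getD, buckets_getD]
  set L := btd.keys.filter (fun k => ad.contains k) with hL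
  -- A: filtered fold over child values
  rw [← List.foldl_filter, ← hL]
  have hm : (L.map (fun k => btd.getD k "")).foldl
        (fun (t : List Int) v => pv_bump t (compute_gainloss_port root v)) [0, 0, 0] =
      L.foldl (fun (t : List Int) k => pv_bump t (compute_gainloss_port root (btd.getD k ""))) [0, 0, 0] :=
    List.foldl_map
  rw [← hm, foldl_bump_eq]
  set g := compute_gainloss_port root with hgdef
  have hlen : (L.map (fun k => btd.getD k "")).length = L.length := by simp
  -- g always lands in {0,1,2}, so the three counters partition the list
  have hsum : ∀ (vals : List String),
      vals.countP (fun v => g v = 0) + vals.countP (fun v => g v = 1) + vals.countP (fun v => g v = 2)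
        = vals.length := by
    intro vals
    induction vals with
    | nil => simp
    | cons v vs ih =>
      have hg : g v = 0 ∨ g v = 1 ∨ g v = 2 := by
        simp only [hgdef, compute_gainloss_port]
        split_ifs <;> simp
      simp only [List.countP_cons, List.length_cons]
      rcases hg with h | h | h <;> simp [h] <;> omega
  -- membership in bucket v ↔ getD = v, for keys of the dict
  have hbucket : ∀ v k, k ∈ L → (k ∈ (btd.items.filter (fun p => p.2 == v)).map (fun p => p.1)
      ↔ btd.getD k "" = v) := by
    intro v k hkL
    have hkkeys : k ∈ btd.keys := (List.mem_filter.mp hkL).1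
    constructor
    · intro hmem
      rcases List.mem_map.mp hmem with ⟨p, hp, hpk⟩
      rcases List.mem_filter.mp hp with ⟨hpi, hpv⟩
      have : btd.get? p.1 = some p.2 :=
        (PySem.Dict.get?_eq_some_iff_mem_items btd p.1 p.2 hnd).mpr (by simpa using hpi)
      rw [← hpk] at hkkeys ⊢
      simp [PySem.Dict.getD_eq_get?_getD, this]
      exact eq_of_beq hpv
    · intro hget
      have hsome : btd.get? k ≠ none := by
        intro hnone
        exact ((PySem.Dict.get?_eq_none_iff_not_mem_keys btd k).mp hnone) hkkeys
      rcases Option.ne_none_iff_exists'.mp hsome with ⟨w, hw⟩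
      have hwv : w = v := by
        rw [PySem.Dict.getD_eq_get?_getD, hw] at hget; simpa using hget
      subst hwv
      have hitem : (k, w) ∈ btd.items := (PySem.Dict.get?_eq_some_iff_mem_items btd k w hnd).mp hw
      exact List.mem_map.mpr ⟨(k, w), List.mem_filter.mpr ⟨hitem, by simp⟩, rfl⟩
  -- intersection cardinalities are countP's over L
  have hinter : ∀ v, (PySem.Set.inter L ((btd.items.filter (fun p => p.2 == v)).map (fun p => p.1))).length
      = L.countP (fun k => btd.getD k "" = v) := by
    intro v
    unfold PySem.Set.inter
    rw [← List.countP_eq_length_filter]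
    refine List.countP_congr ?_
    intro k hk
    simp only [PySem.Set.contains, List.contains_eq_mem, decide_eq_true_eq]
    exact hbucket v k hk
  -- child-value counts over L
  have hcount : ∀ v, (L.map (fun k => btd.getD k "")).countP (fun x => x = v)
      = L.countP (fun k => btd.getD k "" = v) := by
    intro v; rw [List.countP_map]; rfl
  by_cases h0 : root = "0"
  · have e1 : (L.map (fun k => btd.getD k "")).countP (fun v => g v = 1)
        = L.countP (fun k => btd.getD k "" = "1") := by
      rw [← hcount]
      refine List.countP_congr ?_
      intro v _; by_cases hv : v = "1" <;> simp [hgdef, compute_gainloss_port, h0, hv]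
    have e2 : (L.map (fun k => btd.getD k "")).countP (fun v => g v = 2) = 0 := by
      rw [List.countP_eq_zero]
      intro v _; by_cases hv : v = "1" <;> simp [hgdef, compute_gainloss_port, h0, hv]
    have h01 := hsum (L.map (fun k => btd.getD k ""))
    rw [e1, e2, hlen] at h01
    simp only [h0, hinter, if_true, String.reduceEq, reduceIte, List.cons.injEq, and_true]
    refine ⟨by omega, by rw [e1]; omega, by rw [e2]; simp⟩
  · by_cases h1 : root = "1"
    · have e2 : (L.map (fun k => btd.getD k "")).countP (fun v => g v = 2)
          = L.countP (fun k => btd.getD k "" = "0") := by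
        rw [← hcount]
        refine List.countP_congr ?_
        intro v _; by_cases hv : v = "0" <;> simp [hgdef, compute_gainloss_port, h1, hv]
      have e1 : (L.map (fun k => btd.getD k "")).countP (fun v => g v = 1) = 0 := by
        rw [List.countP_eq_zero]
        intro v _; by_cases hv : v = "0" <;> simp [hgdef, compute_gainloss_port, h1, hv]
      have h01 := hsum (L.map (fun k => btd.getD k ""))
      rw [e1, e2, hlen] at h01
      simp only [h1, hinter, String.reduceEq, reduceIte, if_true, List.cons.injEq, and_true]
      refine ⟨by omega, by rw [e1]; simp, by rw [e2]; omega⟩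
    · have e0 : (L.map (fun k => btd.getD k "")).countP (fun v => g v = 0)
          = (L.map (fun k => btd.getD k "")).length := by
        rw [List.countP_eq_length]
        intro v _; simp [hgdef, compute_gainloss_port, h0, h1]
      have e1 : (L.map (fun k => btd.getD k "")).countP (fun v => g v = 1) = 0 := by
        rw [List.countP_eq_zero]
        intro v _; simp [hgdef, compute_gainloss_port, h0, h1]
      have e2 : (L.map (fun k => btd.getD k "")).countP (fun v => g v = 2) = 0 := by
        rw [List.countP_eq_zero]
        intro v _; simp [hgdef, compute_gainloss_port, h0, h1]
      simp [h0, h1, e0, e1, e2]
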